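-- pv_equiv track=rewrite | github.com/Vzupa/Twitter-Scraper | Web_scraper.py | check_string_format
-- ===== SOURCE A (Python) =====
-- def check_string_format(input_str):
--     # Vcasih v tistem glavnem delu tweeta samo 3-je deli namesto 4-ih. S tem odstranim like,share, retweete iz bodi-ja
--     allowed_chars = set('0123456789./KM,\n')
--     if set(input_str) - allowed_chars:
--         return True
--     for val in input_str.split('\n'):
--         if not val.endswith(('K', 'M', "1", "2", "3", "4", "5", "6", "6", "7", "8", "9", "0")) or not val[:-1].replace('.', '').replace(',', '', 1).isdigit():
--             return True
--     return False
-- ===== SOURCE B (Python) =====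
-- def _valid_line(line):
--     # valid iff: at least 2 chars, last char is a digit/K/M, and the rest is
--     # made of digits and dots with at most one comma and at least one digit
--     if len(line) < 2 or line[-1] not in "0123456789KM":
--         return False
--     commas = 0
--     digits = 0
--     for c in line[:-1]:
--         if c == ',':
--             commas += 1
--         elif c.isdigit():
--             digits += 1
--         elif c != '.':
--             return False
--     return commas <= 1 and digits >= 1
--
--
-- def check_string_format(input_str):
--     if any(c not in "0123456789./KM,\n" for c in input_str):
--         return True
--     return any(not _valid_line(line) for line in input_str.split('\n'))
-- ===== Notes on version B (the rewrite author's own statement) =====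
-- stated objective: simpler
-- what changed: A validates each line by rebuilding strings (endswith over a tuple, remove all dots, remove the first comma, isdigit on the rebuilt string); B validates each line in one counting scan over the prefix (comma/digit counters, early reject on any other char) plus a last-character set test.
import Mathlib
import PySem

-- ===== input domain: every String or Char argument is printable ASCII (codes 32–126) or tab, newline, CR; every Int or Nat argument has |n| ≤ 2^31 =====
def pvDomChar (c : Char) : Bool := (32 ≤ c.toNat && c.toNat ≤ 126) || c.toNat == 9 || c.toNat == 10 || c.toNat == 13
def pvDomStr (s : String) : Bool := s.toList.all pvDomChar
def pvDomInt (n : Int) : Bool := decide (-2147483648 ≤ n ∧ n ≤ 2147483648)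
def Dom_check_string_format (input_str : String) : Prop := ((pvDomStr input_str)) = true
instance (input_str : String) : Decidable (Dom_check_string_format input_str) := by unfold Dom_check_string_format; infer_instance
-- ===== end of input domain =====

-- B replaces A's per-line endswith/replace/replace/isdigit string-rebuilding pipeline by a single
-- counting scan over the line's prefix (objective: simpler; no speed claim).

-- ===== PORT A =====
-- s.replace(',', '', 1) for a one-char pattern: remove the first occurrence (PySem.Chars.replace
-- has no count argument, so this helper is the hand port of replace with count=1; exact there).
def pvReplaceFirst (cs : List Char) (old : Char) : List Char :=
  match cs with
  | [] => []
  | c :: rest => if c = old then rest else c :: pvReplaceFirst rest old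

-- the tuple argument of A's val.endswith(...), duplicate "6" included
def pvSuffixes : List (List Char) :=
  [['K'], ['M'], ['1'], ['2'], ['3'], ['4'], ['5'], ['6'], ['6'], ['7'], ['8'], ['9'], ['0']]

-- A's per-line test: not val.endswith(tuple) or not val[:-1].replace('.','').replace(',','',1).isdigit()
def pvBadLineA (val : List Char) : Bool :=
  !(pvSuffixes.any (fun p => PySem.Chars.endswith val p)) ||
  !(PySem.Chars.strIsdigit
      (pvReplaceFirst (PySem.Chars.replace (PySem.List.slice val none (some (-1))) ['.'] []) ','))

def check_string_format (input_str : String) : Bool :=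
  -- if set(input_str) - allowed_chars: return True  (truthiness of the set difference =
  -- some element of set(input_str) is not a member of the allowed set; exact for single chars)
  if (PySem.Set.ofList input_str.toList).any
       (fun c => !(("0123456789./KM,\n".toList).contains c)) then true
  else
    -- for val in input_str.split('\n'): if <bad>: return True / return False
    (PySem.Chars.splitOn input_str.toList ['\n']).any pvBadLineA

-- ===== PORT B =====
-- the counter loop of _valid_line over line[:-1] (early return False on a disallowed char)
def pvScan : List Char → Nat → Nat → Bool
  | [], commas, digits => decide (commas ≤ 1) && decide (1 ≤ digits)
  | c :: rest, commas, digits =>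
    if c = ',' then pvScan rest (commas + 1) digits
    else if PySem.Chars.isdigit c then pvScan rest commas (digits + 1)
    else if c = '.' then pvScan rest commas digits
    else false

def pvValidLine (line : List Char) : Bool :=
  if line.length < 2 then false
  else match PySem.List.pyGet? line (-1) with
    | none => false
    | some last =>
      if !(("0123456789KM".toList).contains last) then false
      else pvScan (PySem.List.slice line none (some (-1))) 0 0

def check_string_format_alt (input_str : String) : Bool :=
  -- any(c not in "0123456789./KM,\n" for c in input_str)  ('c in str' on a single char = membership)
  if input_str.toList.any (fun c => !(("0123456789./KM,\n".toList).contains c)) then true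
  else (PySem.Chars.splitOn input_str.toList ['\n']).any (fun line => !(pvValidLine line))

-- ===== PRECONDITION & SPEC =====
def Spec_check_string_format (input_str : String) (out : Bool) : Prop := out = check_string_format_alt input_str
instance (input_str : String) (out : Bool) : Decidable (Spec_check_string_format input_str out) := by unfold Spec_check_string_format; infer_instance

-- ===== CLAIM (what is proved, stated in full; the proofs are below) =====
def Claim_equal_check_string_format : Prop := ∀ (input_str : String), Dom_check_string_format input_str → Spec_check_string_format input_str (check_string_format input_str)

-- ===== LEMMAS AND PROOFS =====

-- the two character-set guards agree: any over set(s) = any over s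
theorem pv_guard_eq (l : List Char) (p : Char → Bool) :
    (PySem.Set.ofList l).any p = l.any p := by
  rcases h : l.any p with _ | _
  · simp only [List.any_eq_false] at h ⊢
    intro x hx
    exact h x ((PySem.Set.mem_ofList l x).mp hx)
  · simp only [List.any_eq_true] at h ⊢
    obtain ⟨x, hx, hp⟩ := h
    exact ⟨x, (PySem.Set.mem_ofList l x).mpr hx, hp⟩

-- replace with a one-char pattern and empty replacement is filter
theorem pv_replace_go_filter (c : Char) (l acc : List Char) (fuel : Nat) (hf : l.length ≤ fuel) :
    PySem.Chars.replace.go [c] [] fuel l acc = acc.reverse ++ l.filter (fun x => x ≠ c) := by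
  induction l generalizing fuel acc with
  | nil => cases fuel <;> simp [PySem.Chars.replace.go]
  | cons d t ih =>
    cases fuel with
    | zero => simp at hf
    | succ n =>
      simp only [PySem.Chars.replace.go]
      by_cases hd : d = c
      · subst hd
        rw [if_pos (by simp [List.isPrefixOf])]
        simpa using ih acc n (by simpa using Nat.le_of_succ_le_succ (by simpa using hf))
      · have hpf : ¬ ([c].isPrefixOf (d :: t) = true) := by
          simp only [List.isPrefixOf, Bool.and_eq_true, beq_iff_eq]
          rintro ⟨h, -⟩
          exact hd h.symm
        rw [if_neg hpf]
        rw [ih (d :: acc) n (by simpa using Nat.le_of_succ_le_succ (by simpa using hf))]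
        simp [hd]

theorem pv_replace_filter (c : Char) (l : List Char) :
    PySem.Chars.replace l [c] [] = l.filter (fun x => x ≠ c) := by
  simpa using pv_replace_go_filter c l [] l.length le_rfl

-- the scan computes: all chars allowed, total commas ≤ 1, at least one digit
theorem pv_scan_eq (pre : List Char) (commas digits : Nat) :
    pvScan pre commas digits =
      (pre.all (fun x => x = ',' || PySem.Chars.isdigit x || x = '.') &&
       decide (commas + pre.count ',' ≤ 1) &&
       decide (1 ≤ digits + pre.countP PySem.Chars.isdigit)) := by
  induction pre generalizing commas digits with
  | nil => simp [pvScan]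
  | cons c t ih =>
    simp only [pvScan]
    by_cases hc : c = ','
    · subst hc
      rw [if_pos rfl, ih]
      apply Bool.eq_iff_iff.mpr
      have hnd : PySem.Chars.isdigit ',' = false := by decide
      simp [List.count_cons, hnd]
      intros
      omega
    · rw [if_neg hc]
      by_cases hd : PySem.Chars.isdigit c
      · rw [if_pos hd, ih]
        apply Bool.eq_iff_iff.mpr
        have hcc : (c == ',') = false := by simp [hc]
        simp [List.count_cons, hcc, hd]
        intros
        omega
      · rw [if_neg (by simpa using hd)]
        by_cases he : c = '.'
        · subst he
          rw [if_pos rfl, ih]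
          apply Bool.eq_iff_iff.mpr
          have hnd : PySem.Chars.isdigit '.' = false := by decide
          have hcc : (('.' : Char) == ',') = false := by decide
          simp [List.count_cons, hnd, hcc]
        · rw [if_neg he]
          apply Bool.eq_iff_iff.mpr
          simp [hc, hd, he]

-- all-digit lists are exactly the comma-free lists of allowed chars
theorem pv_A0' (t : List Char) :
    (∀ x ∈ t, PySem.Chars.isdigit x = true) ↔
      ((∀ x ∈ t, x = ',' ∨ PySem.Chars.isdigit x = true) ∧ t.count ',' = 0) := by
  rw [List.count_eq_zero]
  constructor
  · intro h
    refine ⟨fun x hx => Or.inr (h x hx), fun hm => ?_⟩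
    have := h _ hm
    simp [PySem.Chars.isdigit] at this
  · rintro ⟨h1, h2⟩ x hx
    rcases h1 x hx with rfl | hd
    · exact absurd hx h2
    · exact hd

-- isdigit() of a whole list, characterised by membership and counts
theorem pv_A0 (t : List Char) :
    PySem.Chars.strIsdigit t = true ↔
      ((∀ x ∈ t, x = ',' ∨ PySem.Chars.isdigit x = true) ∧ t.count ',' = 0 ∧
       1 ≤ t.countP PySem.Chars.isdigit) := by
  simp only [PySem.Chars.strIsdigit, Bool.and_eq_true, Bool.not_eq_true',
    List.isEmpty_eq_false_iff, List.all_eq_true]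
  constructor
  · rintro ⟨hne, hall⟩
    obtain ⟨h1, h2⟩ := (pv_A0' t).mp hall
    refine ⟨h1, h2, ?_⟩
    rw [List.countP_eq_length.mpr hall]
    exact List.length_pos_of_ne_nil hne
  · rintro ⟨h1, h2, h3⟩
    refine ⟨?_, (pv_A0' t).mpr ⟨h1, h2⟩⟩
    obtain ⟨a, ha, -⟩ := List.countP_pos_iff.mp (Nat.lt_of_lt_of_le Nat.one_pos h3)
    exact List.ne_nil_of_mem ha

-- removing the first comma leaves only digits, iff at most one comma and the rest allowed
theorem pv_A2 (t : List Char) :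
    (∀ x ∈ pvReplaceFirst t ',', PySem.Chars.isdigit x = true) ↔
      ((∀ x ∈ t, x = ',' ∨ PySem.Chars.isdigit x = true) ∧ t.count ',' ≤ 1) := by
  induction t with
  | nil => simp [pvReplaceFirst]
  | cons c t ih =>
    by_cases hc : c = ','
    · subst hc
      have hrf : pvReplaceFirst (',' :: t) ',' = t := by simp [pvReplaceFirst]
      rw [hrf, pv_A0' t, List.count_cons_self]
      constructor
      · rintro ⟨h1, h2⟩
        refine ⟨fun x hx => ?_, by omega⟩
        rcases List.mem_cons.mp hx with rfl | hx
        · exact Or.inl rfl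
        · exact h1 x hx
      · rintro ⟨h1, h2⟩
        exact ⟨fun x hx => h1 x (List.mem_cons_of_mem _ hx), by omega⟩
    · have hrf : pvReplaceFirst (c :: t) ',' = c :: pvReplaceFirst t ',' := by
        simp [pvReplaceFirst, hc]
      have hcnt : (c :: t).count ',' = t.count ',' := by
        rw [List.count_cons]
        simp
        exact hc
      rw [hrf, hcnt]
      by_cases hd : PySem.Chars.isdigit c
      · constructor
        · intro h
          obtain ⟨h1, h2⟩ := ih.mp (fun x hx => h x (List.mem_cons_of_mem _ hx))
          refine ⟨fun x hx => ?_, h2⟩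
          rcases List.mem_cons.mp hx with rfl | hx
          · exact Or.inr hd
          · exact h1 x hx
        · rintro ⟨h1, h2⟩ x hx
          rcases List.mem_cons.mp hx with rfl | hx
          · exact hd
          · exact (ih.mpr ⟨fun y hy => h1 y (List.mem_cons_of_mem _ hy), h2⟩) x hx
      · constructor
        · intro h
          exact absurd (h c (List.mem_cons_self ..)) hd
        · rintro ⟨h1, -⟩
          rcases h1 c (List.mem_cons_self ..) with rfl | hdd
          · exact absurd rfl hc
          · exact absurd hdd hd

-- A's stripped-isdigit test, characterised on the unfiltered list
theorem pv_A1 (f : List Char) :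
    PySem.Chars.strIsdigit (pvReplaceFirst f ',') = true ↔
      ((∀ x ∈ f, x = ',' ∨ PySem.Chars.isdigit x = true) ∧ f.count ',' ≤ 1 ∧
       1 ≤ f.countP PySem.Chars.isdigit) := by
  induction f with
  | nil => simp [pvReplaceFirst, PySem.Chars.strIsdigit]
  | cons c t ih =>
    by_cases hc : c = ','
    · subst hc
      have hrf : pvReplaceFirst (',' :: t) ',' = t := by simp [pvReplaceFirst]
      have hnd : PySem.Chars.isdigit ',' = false := by decide
      have hcp : (',' :: t).countP PySem.Chars.isdigit = t.countP PySem.Chars.isdigit := by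
        simp [List.countP_cons, hnd]
      rw [hrf, pv_A0 t, List.count_cons_self, hcp]
      constructor
      · rintro ⟨h1, h2, h3⟩
        refine ⟨fun x hx => ?_, by omega, by omega⟩
        rcases List.mem_cons.mp hx with rfl | hx
        · exact Or.inl rfl
        · exact h1 x hx
      · rintro ⟨h1, h2, h3⟩
        exact ⟨fun x hx => h1 x (List.mem_cons_of_mem _ hx), by omega, by omega⟩
    · have hrf : pvReplaceFirst (c :: t) ',' = c :: pvReplaceFirst t ',' := by
        simp [pvReplaceFirst, hc]
      have hcnt : (c :: t).count ',' = t.count ',' := by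
        rw [List.count_cons]
        simp
        exact hc
      have hstr : PySem.Chars.strIsdigit (c :: pvReplaceFirst t ',') = true ↔
          (PySem.Chars.isdigit c = true ∧
           ∀ x ∈ pvReplaceFirst t ',', PySem.Chars.isdigit x = true) := by
        simp [PySem.Chars.strIsdigit]
      rw [hrf, hcnt, hstr]
      by_cases hd : PySem.Chars.isdigit c
      · have hcp : (c :: t).countP PySem.Chars.isdigit
            = t.countP PySem.Chars.isdigit + 1 := by
          simp [List.countP_cons, hd]
        rw [hcp]
        constructor
        · rintro ⟨-, h⟩
          obtain ⟨h1, h2⟩ := (pv_A2 t).mp h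
          refine ⟨fun x hx => ?_, h2, by omega⟩
          rcases List.mem_cons.mp hx with rfl | hx
          · exact Or.inr hd
          · exact h1 x hx
        · rintro ⟨h1, h2, -⟩
          exact ⟨hd, (pv_A2 t).mpr ⟨fun x hx => h1 x (List.mem_cons_of_mem _ hx), h2⟩⟩
      · constructor
        · rintro ⟨h, -⟩
          exact absurd h hd
        · rintro ⟨h1, -, -⟩
          rcases h1 c (List.mem_cons_self ..) with rfl | hdd
          · exact absurd rfl hc
          · exact absurd hdd hd

-- A's whole digit pipeline equals B's scan, on any prefix list
theorem pv_digit_eq (pre : List Char) :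
    PySem.Chars.strIsdigit
        (pvReplaceFirst (PySem.Chars.replace pre ['.'] []) ',') = pvScan pre 0 0 := by
  rw [pv_replace_filter, pv_scan_eq]
  apply Bool.eq_iff_iff.mpr
  rw [pv_A1]
  have hcount : (pre.filter (fun x => x ≠ '.')).count ',' = pre.count ',' := by
    rw [List.count_filter (by decide)]
  have hcountP : (pre.filter (fun x => x ≠ '.')).countP PySem.Chars.isdigit
      = pre.countP PySem.Chars.isdigit := by
    rw [List.countP_filter]
    apply List.countP_congr
    intro a _
    by_cases h : PySem.Chars.isdigit a
    · have : a ≠ '.' := by rintro rfl; exact absurd h (by decide)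
      simp [h, this]
    · simp [h]
  simp only [List.mem_filter, decide_eq_true_eq, hcount, hcountP, Bool.and_eq_true,
    List.all_eq_true, Bool.or_eq_true, decide_eq_true_eq]
  constructor
  · rintro ⟨h1, h2, h3⟩
    refine ⟨⟨fun x hx => ?_, by omega⟩, by omega⟩
    by_cases hdot : x = '.'
    · exact Or.inr hdot
    · rcases h1 x ⟨hx, hdot⟩ with h | h
      · exact Or.inl (Or.inl h)
      · exact Or.inl (Or.inr h)
  · rintro ⟨⟨h1, h2⟩, h3⟩
    refine ⟨fun x hx => ?_, by omega, by omega⟩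
    rcases h1 x hx.1 with h | h
    · rcases h with h | h
      · exact Or.inl h
      · exact Or.inr h
    · exact absurd h hx.2

-- endswith with a single-char suffix is a getLast? test
theorem pv_endswith_single (s : List Char) (c : Char) :
    PySem.Chars.endswith s [c] = (s.getLast? == some c) := by
  show ([c].isSuffixOf s) = _
  rw [List.isSuffixOf, ← List.head?_reverse]
  cases s.reverse with
  | nil => rfl
  | cons d t =>
    by_cases h : c = d
    · subst h
      simp [List.isPrefixOf]
    · simp [List.isPrefixOf, h, Ne.symm h]

-- A's endswith-tuple equals B's membership test on the last character
theorem pv_suffix_eq (val : List Char) (c : Char) (h : val.getLast? = some c) :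
    pvSuffixes.any (fun p => PySem.Chars.endswith val p) =
      ("0123456789KM".toList).contains c := by
  apply Bool.eq_iff_iff.mpr
  simp [pvSuffixes, pv_endswith_single, h]
  tauto

-- boolean shape of the final comparison of one line
theorem pv_bool_final (b t : Bool) : (!b || !t) = !(if (!b) = true then false else t) := by
  cases b <;> cases t <;> rfl

-- per-line agreement of the two programs
theorem pv_line_eq (val : List Char) : pvBadLineA val = !(pvValidLine val) := by
  cases hlast : val.getLast? with
  | none =>
    rw [List.getLast?_eq_none_iff] at hlast
    subst hlast
    decide
  | some c =>
    unfold pvBadLineA pvValidLine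
    have hslice : PySem.List.slice val none (some (-1)) = val.dropLast := by simp [pysem]
    have hget : PySem.List.pyGet? val (-1) = val.getLast? := by simp [pysem]
    rw [hslice, hget, hlast, pv_digit_eq, pv_suffix_eq val c hlast]
    by_cases hlen : val.length < 2
    · have hpre : val.dropLast = [] := by
        have h1 : val.dropLast.length = val.length - 1 := List.length_dropLast
        apply List.eq_nil_of_length_eq_zero
        omega
      rw [if_pos hlen, hpre]
      simp [pvScan]
    · rw [if_neg hlen]
      exact pv_bool_final ("0123456789KM".toList.contains c) (pvScan val.dropLast 0 0)

theorem check_string_format_spec : Claim_equal_check_string_format := by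
  intro s _
  unfold Spec_check_string_format check_string_format check_string_format_alt
  rw [pv_guard_eq]
  cases h : s.toList.any (fun c => !(("0123456789./KM,\n".toList).contains c)) with
  | false =>
    simp only [Bool.false_eq_true, if_false]
    congr 1
    funext line
    exact pv_line_eq line
  | true =>
    rfl
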